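-- pv_equiv track=rewrite | github.com/raikoug/AoCv2 | python/aoc_solutions/2024/day_25.py | eval_key
-- ===== SOURCE A (Python) =====
-- from typing import List, Tuple
--
-- def eval_key(lines: List[str]) -> List[int]:
--     """
--     Converte la rappresentazione di una chiave in una lista di altezze per colonna.
--
--     Esempio (h = 7):
--
--         ..... 6
--         ..... 5
--         ..... 4
--         #.... 3
--         #.#.. 2
--         #.#.# 1
--         ##### 0
--
--     Il valore per ogni colonna è "quanti # sopra il bordo in basso".
--     """
--     h = len(lines)
--     w = len(lines[0])
--     res: List[int] = [0] * w
--
--     for row, line in enumerate(lines):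
--         for col, ch in enumerate(line):
--             if ch == "#":
--                 # distanza dal basso (riga 0 in basso)
--                 res[col] = max(res[col], h - row - 1)
--
--     return res
-- ===== SOURCE B (Python) =====
-- def eval_key(lines):
--     h = len(lines)
--     w = len(lines[0])
--     res = []
--     for c in range(w):
--         val = 0
--         for r, line in enumerate(lines):
--             if c < len(line) and line[c] == '#':
--                 val = h - r - 1
--                 break
--         res.append(val)
--     return res
-- ===== Notes on version B (the rewrite author's own statement) =====
-- stated objective: alternative
-- what changed: Column-major scan with early exit at the topmost '#' per column, instead of A's per-cell running max over the whole grid.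
import Mathlib
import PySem

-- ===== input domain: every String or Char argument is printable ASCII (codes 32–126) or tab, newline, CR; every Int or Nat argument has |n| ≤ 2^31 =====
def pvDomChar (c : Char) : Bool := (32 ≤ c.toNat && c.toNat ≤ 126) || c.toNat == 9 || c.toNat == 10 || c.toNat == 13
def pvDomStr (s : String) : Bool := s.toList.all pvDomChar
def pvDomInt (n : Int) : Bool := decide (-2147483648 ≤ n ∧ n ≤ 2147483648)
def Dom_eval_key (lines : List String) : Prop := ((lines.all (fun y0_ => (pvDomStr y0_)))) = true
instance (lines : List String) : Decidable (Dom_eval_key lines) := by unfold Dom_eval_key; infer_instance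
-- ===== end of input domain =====

-- B replaces A's per-cell running max by a column-major scan that stops at the topmost '#' of each column (alternative decomposition; return values proved equal on Pre_).

-- ===== PORT A =====
-- inner loop: for col, ch in enumerate(line): if ch == '#': res[col] = max(res[col], h - row - 1)
def evalKeyRow (h : Int) (row : Int) (res : List Int) (line : String) : List Int :=
  (PySem.List.enumerate line.toList).foldl
    (fun r p => if p.2 = '#' then r.set p.1.toNat (max (r.getD p.1.toNat 0) (h - row - 1)) else r) res

def eval_key (lines : List String) : List Int :=
  let h : Int := lines.length
  let w : Nat := (lines.headD "").toList.length   -- len(lines[0]); Pre_ excludes lines = [] (Python raises there)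
  (PySem.List.enumerate lines).foldl (fun res p => evalKeyRow h p.1 res p.2) (List.replicate w 0)

-- ===== PORT B =====
-- for r, line in enumerate(lines): if c < len(line) and line[c] == '#': val = h - r - 1; break
def evalKeyAltGo (h : Int) (c : Nat) : Nat → List String → Int
  | _, [] => 0
  | r, line :: rest =>
      if c < line.toList.length ∧ line.toList.getD c ' ' = '#' then h - (r : Int) - 1
      else evalKeyAltGo h c (r + 1) rest

def eval_key_alt (lines : List String) : List Int :=
  let h : Int := lines.length
  let w : Nat := (lines.headD "").toList.length
  (List.range w).map (fun c => evalKeyAltGo h c 0 lines)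

-- ===== PRECONDITION & SPEC =====
-- Pre_ excludes exactly the inputs where Python A raises IndexError: the empty list (lines[0])
-- and grids where some line carries a '#' at an index ≥ len(lines[0]) (res[col] assignment).
def Pre_eval_key (lines : List String) : Prop :=
  lines ≠ [] ∧ ∀ line ∈ lines, '#' ∉ line.toList.drop (lines.headD "").toList.length
instance (lines : List String) : Decidable (Pre_eval_key lines) := by unfold Pre_eval_key; infer_instance
def pvWitness_eval_key : List String := ["#....", "#.#.#", "#####"]

def Spec_eval_key (lines : List String) (out : List Int) : Prop := out = eval_key_alt lines
instance (lines : List String) (out : List Int) : Decidable (Spec_eval_key lines out) := by unfold Spec_eval_key; infer_instance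

-- ===== CLAIM (what is proved, stated in full; the proofs are below) =====
def Claim_equal_eval_key : Prop := ∀ (lines : List String), Dom_eval_key lines → Pre_eval_key lines → Spec_eval_key lines (eval_key lines)

-- ===== LEMMAS AND PROOFS =====

theorem evalKeyRow_length (h row : Int) (res : List Int) (line : String) :
    (evalKeyRow h row res line).length = res.length := by
  unfold evalKeyRow
  generalize PySem.List.enumerate line.toList = ps
  induction ps generalizing res with
  | nil => rfl
  | cons p rest ih =>
      simp only [List.foldl_cons]
      rw [ih]
      split <;> simp

-- pointwise effect of one row: column c becomes max with v iff (c,'#') occurs in the pair list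
theorem foldl_set_getD (ps : List (Int × Char)) (res : List Int) (v : Int) (c : Nat)
    (hc : c < res.length) :
    (ps.foldl (fun r p => if p.2 = '#' then r.set p.1.toNat (max (r.getD p.1.toNat 0) v) else r) res).getD c 0
      = if (∃ p ∈ ps, p.1.toNat = c ∧ p.2 = '#') then max (res.getD c 0) v else res.getD c 0 := by
  induction ps generalizing res with
  | nil => simp
  | cons p rest ih =>
      simp only [List.foldl_cons]
      by_cases hp : p.2 = '#'
      · rw [if_pos hp, ih _ (by simpa using hc)]
        by_cases hj : p.1.toNat = c
        · have h1 : ((res.set p.1.toNat (max (res.getD p.1.toNat 0) v)).getD c 0)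
              = max (res.getD c 0) v := by
            subst hj
            simp [List.getD_eq_getElem?_getD, List.getElem?_set_self', List.getElem?_eq_getElem hc]
          have hmem : ∃ q ∈ p :: rest, q.1.toNat = c ∧ q.2 = '#' := ⟨p, by simp [hp, hj]⟩
          rw [h1, if_pos hmem]
          split_ifs with ht
          · rw [max_assoc, max_self]
          · rfl
        · have h1 : ((res.set p.1.toNat (max (res.getD p.1.toNat 0) v)).getD c 0) = res.getD c 0 := by
            simp [List.getD_eq_getElem?_getD, List.getElem?_set_ne hj]
          rw [h1]
          have hiff : (∃ q ∈ p :: rest, q.1.toNat = c ∧ q.2 = '#') ↔ (∃ q ∈ rest, q.1.toNat = c ∧ q.2 = '#') := by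
            constructor
            · rintro ⟨q, hq, h2, h3⟩
              rcases List.mem_cons.mp hq with rfl | hq'
              · exact absurd h2 hj
              · exact ⟨q, hq', h2, h3⟩
            · rintro ⟨q, hq, h2, h3⟩; exact ⟨q, List.mem_cons_of_mem _ hq, h2, h3⟩
          rw [if_congr hiff rfl rfl]
      · rw [if_neg hp, ih _ hc]
        have hiff : (∃ q ∈ p :: rest, q.1.toNat = c ∧ q.2 = '#') ↔ (∃ q ∈ rest, q.1.toNat = c ∧ q.2 = '#') := by
          constructor
          · rintro ⟨q, hq, h2, h3⟩
            rcases List.mem_cons.mp hq with rfl | hq'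
            · exact absurd h3 hp
            · exact ⟨q, hq', h2, h3⟩
          · rintro ⟨q, hq, h2, h3⟩; exact ⟨q, List.mem_cons_of_mem _ hq, h2, h3⟩
        rw [if_congr hiff rfl rfl]

def hashAt (line : String) (c : Nat) : Bool := line.toList.getD c ' ' == '#'

theorem hashAt_iff_mem_enumerate (line : String) (c : Nat) :
    hashAt line c ↔ ∃ p ∈ PySem.List.enumerate line.toList 0, p.1.toNat = c ∧ p.2 = '#' := by
  constructor
  · intro hh
    unfold hashAt at hh
    rw [beq_iff_eq] at hh
    have hlt : c < line.toList.length := by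
      by_contra hge
      simp [List.getD_eq_getElem?_getD, List.getElem?_eq_none (by omega : line.toList.length ≤ c)] at hh
    refine ⟨((c : Int), line.toList[c]), ?_, by simp, ?_⟩
    · rw [PySem.List.mem_enumerate_iff]
      exact ⟨c, hlt, by simp⟩
    · simpa [List.getD_eq_getElem?_getD, List.getElem?_eq_getElem hlt] using hh
  · rintro ⟨p, hp, hc, hh⟩
    rw [PySem.List.mem_enumerate_iff] at hp
    obtain ⟨k, hk, rfl⟩ := hp
    simp at hc
    subst hc
    unfold hashAt
    rw [beq_iff_eq]
    simpa [List.getD_eq_getElem?_getD, List.getElem?_eq_getElem hk] using hh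

theorem evalKeyRow_getD (h row : Int) (res : List Int) (line : String) (c : Nat)
    (hc : c < res.length) :
    (evalKeyRow h row res line).getD c 0
      = if hashAt line c then max (res.getD c 0) (h - row - 1) else res.getD c 0 := by
  unfold evalKeyRow
  rw [foldl_set_getD _ _ _ _ hc, if_congr (hashAt_iff_mem_enumerate line c).symm rfl rfl]

-- B's condition unfolded
theorem altGo_unfold (h : Int) (c r : Nat) (line : String) (rest : List String) :
    evalKeyAltGo h c r (line :: rest)
      = if c < line.toList.length ∧ line.toList.getD c ' ' = '#' then h - (r : Int) - 1
        else evalKeyAltGo h c (r + 1) rest := rfl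

theorem altGo_cons (h : Int) (c r : Nat) (line : String) (rest : List String) :
    evalKeyAltGo h c r (line :: rest)
      = if hashAt line c then h - (r : Int) - 1 else evalKeyAltGo h c (r + 1) rest := by
  rw [altGo_unfold]
  by_cases hh : hashAt line c
  · rw [if_pos hh]
    have hgd : line.toList.getD c ' ' = '#' := by
      unfold hashAt at hh; exact beq_iff_eq.mp hh
    have hlt : c < line.toList.length := by
      by_contra hge
      simp [List.getD_eq_getElem?_getD, List.getElem?_eq_none (by omega : line.toList.length ≤ c)] at hgd
    rw [if_pos ⟨hlt, hgd⟩]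
  · rw [if_neg hh]
    have hgd : ¬ line.toList.getD c ' ' = '#' := by
      unfold hashAt at hh; exact fun e => hh (beq_iff_eq.mpr e)
    rw [if_neg (fun hcond => hgd hcond.2)]

theorem altGo_none (h : Int) (c : Nat) (rest : List String) (r : Nat)
    (hn : ∀ line ∈ rest, ¬ hashAt line c) : evalKeyAltGo h c r rest = 0 := by
  induction rest generalizing r with
  | nil => rfl
  | cons line tail ih =>
      rw [altGo_cons, if_neg (hn line (by simp))]
      exact ih _ (fun l hl => hn l (by simp [hl]))

theorem altGo_le (h : Int) (c : Nat) (rest : List String) (r : Nat)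
    (he : ∃ line ∈ rest, hashAt line c) : evalKeyAltGo h c r rest ≤ h - (r : Int) - 1 := by
  induction rest generalizing r with
  | nil => simp at he
  | cons line tail ih =>
      rw [altGo_cons]
      split
      · omega
      · obtain ⟨l, hl, hh⟩ := he
        rcases List.mem_cons.mp hl with rfl | hl'
        · exact absurd hh (by assumption)
        · have := ih (r + 1) ⟨l, hl', hh⟩
          push_cast at this ⊢
          omega

theorem altGo_nonneg (h : Int) (c : Nat) (rest : List String) (r : Nat)
    (he : ∃ line ∈ rest, hashAt line c) (hr : (r : Int) + rest.length ≤ h) :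
    0 ≤ evalKeyAltGo h c r rest := by
  induction rest generalizing r with
  | nil => simp at he
  | cons line tail ih =>
      rw [altGo_cons]
      split
      · simp only [List.length_cons] at hr
        push_cast at hr
        omega
      · obtain ⟨l, hl, hh⟩ := he
        rcases List.mem_cons.mp hl with rfl | hl'
        · exact absurd hh (by assumption)
        · refine ih (r + 1) ⟨l, hl', hh⟩ ?_
          simp only [List.length_cons] at hr
          push_cast at hr ⊢
          omega

-- main outer-loop invariant, over the A-side fold with arbitrary start row r0
theorem outer_fold (h : Int) (rest : List String) (r0 : Nat) (res : List Int) (c : Nat)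
    (hc : c < res.length) :
    ((PySem.List.enumerate rest (r0 : Int)).foldl (fun res p => evalKeyRow h p.1 res p.2) res).getD c 0
      = if ∃ line ∈ rest, hashAt line c
        then max (res.getD c 0) (evalKeyAltGo h c r0 rest)
        else res.getD c 0 := by
  induction rest generalizing r0 res with
  | nil => simp [PySem.List.enumerate_nil]
  | cons line tail ih =>
      rw [PySem.List.enumerate_cons]
      simp only [List.foldl_cons]
      have hlen : c < (evalKeyRow h (r0 : Int) res line).length := by rw [evalKeyRow_length]; exact hc
      have hcast : ((r0 : Int) + 1) = ((r0 + 1 : Nat) : Int) := by push_cast; ring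
      rw [hcast, ih (r0 + 1) _ hlen, evalKeyRow_getD h _ res line c hc, altGo_cons]
      by_cases hh : hashAt line c
      · rw [if_pos hh, if_pos hh]
        have hex : ∃ l ∈ line :: tail, hashAt l c := ⟨line, by simp, hh⟩
        rw [if_pos hex]
        by_cases ht : ∃ l ∈ tail, hashAt l c
        · rw [if_pos ht]
          have := altGo_le h c tail (r0 + 1) ht
          push_cast at this
          omega
        · rw [if_neg ht]
      · rw [if_neg hh, if_neg hh]
        have : (∃ l ∈ line :: tail, hashAt l c) ↔ (∃ l ∈ tail, hashAt l c) := by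
          constructor
          · rintro ⟨l, hl, h2⟩
            rcases List.mem_cons.mp hl with rfl | hl'
            · exact absurd h2 hh
            · exact ⟨l, hl', h2⟩
          · rintro ⟨l, hl, h2⟩; exact ⟨l, List.mem_cons_of_mem _ hl, h2⟩
        rw [if_congr this rfl rfl]

theorem eval_key_length (lines : List String) :
    (eval_key lines).length = (lines.headD "").toList.length := by
  unfold eval_key
  generalize (PySem.List.enumerate lines 0) = ps
  generalize hgen : ((lines.headD "").toList.length) = w
  have : ∀ (ps : List (Int × String)) (res : List Int),
      (ps.foldl (fun res p => evalKeyRow (lines.length : Int) p.1 res p.2) res).length = res.length := by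
    intro ps
    induction ps with
    | nil => intro res; rfl
    | cons p rest ih => intro res; simp only [List.foldl_cons]; rw [ih, evalKeyRow_length]
  simp [this]

theorem eval_key_getD (lines : List String) (c : Nat) (hc : c < (lines.headD "").toList.length) :
    (eval_key lines).getD c 0 = evalKeyAltGo (lines.length : Int) c 0 lines := by
  unfold eval_key
  have hmain := outer_fold (lines.length : Int) lines 0
      (List.replicate ((lines.headD "").toList.length) 0) c (by simpa using hc)
  simp only [Nat.cast_zero] at hmain
  rw [hmain]
  by_cases he : ∃ line ∈ lines, hashAt line c
  · rw [if_pos he]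
    have hnn : 0 ≤ evalKeyAltGo (lines.length : Int) c 0 lines :=
      altGo_nonneg _ c lines 0 he (by simp)
    have hrep : (List.replicate (lines.headD "").toList.length (0 : Int)).getD c 0 = 0 := by
      simp only [List.getD_eq_getElem?_getD, List.getElem?_replicate]
      split <;> simp
    rw [hrep]
    omega
  · rw [if_neg he, altGo_none _ _ _ _ (by intro l hl h2; exact he ⟨l, hl, h2⟩)]
    simp only [List.getD_eq_getElem?_getD, List.getElem?_replicate]
    split <;> simp

-- ===== VERDICT (by name: the statement is the Claim_ definition above) =====
theorem eval_key_spec : Claim_equal_eval_key := by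
  intro lines _ _
  unfold Spec_eval_key
  apply List.ext_getElem
  · rw [eval_key_length]; unfold eval_key_alt; simp
  · intro c h1 h2
    have hc : c < (lines.headD "").toList.length := by rwa [eval_key_length] at h1
    have hA : (eval_key lines)[c] = (eval_key lines).getD c 0 := by
      rw [List.getD_eq_getElem?_getD, List.getElem?_eq_getElem h1]; rfl
    rw [hA, eval_key_getD lines c hc]
    unfold eval_key_alt
    simp only [List.getElem_map, List.getElem_range]
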